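-- pv_equiv track=rewrite | github.com/Amoonguses1/Leetcode | 2380_time_needed_to_rearrange_a_binary_string.py | secondsToRemoveOccurrences2
-- ===== SOURCE A (Python) =====
-- def secondsToRemoveOccurrences2(s: str) -> int:
--     # Time: O(N^2)
--     # Space: O(N)
--     # N = len(s)
--     cnt = -1
--     next_string = s
--     s = ""
--     while s != next_string:
--         s = next_string
--         next_string = ""
--         pos = 0
--         while pos < len(s):
--             if s[pos:pos+2] == "01":
--                 next_string += "10"
--                 pos += 2
--             else:
--                 next_string += s[pos]
--                 pos += 1
--         cnt += 1
--     return cnt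
-- ===== SOURCE B (Python) =====
-- def secondsToRemoveOccurrences2(s: str) -> int:
--     # One pass: within each maximal run of '0'/'1' characters, a '1' with z zeros
--     # before it finishes at time max(prev_time + 1, z); answer is the overall max.
--     zeros = 0
--     t = 0
--     ans = 0
--     for c in s:
--         if c == '0':
--             zeros += 1
--         elif c == '1':
--             if zeros > 0:
--                 t = max(t + 1, zeros)
--                 if t > ans:
--                     ans = t
--         else:
--             zeros = 0
--             t = 0
--     return ans
-- ===== Notes on version B (the rewrite author's own statement) =====
-- stated objective: faster
-- what changed: Replaces the repeated rewrite-until-fixpoint simulation (one full pass per second swapping each zero-one pair) with a single left-to-right scan that computes the stabilisation time directly via the scheduling recurrence t = max(t+1, zeros) at each one-digit, resetting at non-binary characters.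
-- intended difference: On the empty string A returns -1 (its do-while counter starts at -1 and the loop body never runs), while B returns 0, the intended number of seconds needed for an already-stable string. — e.g. on secondsToRemoveOccurrences2(""): A returns -1, B returns 0
import Mathlib
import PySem

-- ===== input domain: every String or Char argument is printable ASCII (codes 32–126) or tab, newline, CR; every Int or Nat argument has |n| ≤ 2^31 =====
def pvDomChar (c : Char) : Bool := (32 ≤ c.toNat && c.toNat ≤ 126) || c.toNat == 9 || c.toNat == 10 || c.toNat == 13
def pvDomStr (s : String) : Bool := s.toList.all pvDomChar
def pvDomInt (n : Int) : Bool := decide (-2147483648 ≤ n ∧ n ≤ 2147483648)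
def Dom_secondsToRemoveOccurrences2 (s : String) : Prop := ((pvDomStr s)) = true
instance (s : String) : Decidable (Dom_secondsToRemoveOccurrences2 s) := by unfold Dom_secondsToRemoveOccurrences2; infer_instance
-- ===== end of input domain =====

-- B replaces A's pass-until-stable simulation with a single scan (t = max(t+1, zeros) per '1').

-- ===== PORT A =====
-- inner while loop of A: one pass over s, replacing each "01" by "10" (pos += 2), else copying one char
def passA : List Char → List Char
  | [] => []
  | [c] => [c]
  | c :: c2 :: r => if c = '0' ∧ c2 = '1' then '1' :: '0' :: passA r else c :: passA (c2 :: r)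

-- outer while loop of A (state: cnt, s, next_string); fuel only makes it total, it is never
-- exhausted on the actual call (proved below: the loop needs at most length+1 iterations)
def loopA : Nat → Int → List Char → List Char → Int
  | 0, cnt, _, _ => cnt
  | f + 1, cnt, s, next => if s = next then cnt else loopA f (cnt + 1) next (passA next)

def secondsToRemoveOccurrences2 (s : String) : Int :=
  loopA (s.toList.length + 2) (-1) [] s.toList

-- ===== PORT B =====
def altGo : List Char → Int → Int → Int → Int
  | [], _, _, ans => ans
  | c :: r, zeros, t, ans =>
    if c = '0' then altGo r (zeros + 1) t ans
    else if c = '1' then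
      if zeros > 0 then altGo r zeros (max (t + 1) zeros) (max ans (max (t + 1) zeros))
      else altGo r zeros t ans
    else altGo r 0 0 ans

def secondsToRemoveOccurrences2_alt (s : String) : Int :=
  altGo s.toList 0 0 0

-- ===== PRECONDITION & SPEC =====
-- On the empty string A returns -1 (its counter starts at -1 and the loop body never runs),
-- while B returns 0, the intended number of seconds for an already-stable string.
def D_secondsToRemoveOccurrences2 (s : String) : Prop := s = ""
instance (s : String) : Decidable (D_secondsToRemoveOccurrences2 s) := by unfold D_secondsToRemoveOccurrences2; infer_instance

def Spec_secondsToRemoveOccurrences2 (s : String) (out : Int) : Prop :=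
  ¬ D_secondsToRemoveOccurrences2 s → out = secondsToRemoveOccurrences2_alt s
instance (s : String) (out : Int) : Decidable (Spec_secondsToRemoveOccurrences2 s out) := by unfold Spec_secondsToRemoveOccurrences2; infer_instance

def pvDiffWitness_secondsToRemoveOccurrences2 : String := ""
def pvDiffWitnessOut_secondsToRemoveOccurrences2 : Int × Int := (-1, 0)

-- ===== CLAIM (what is proved, stated in full; the proofs are below) =====
def Claim_unchanged_secondsToRemoveOccurrences2 : Prop := ∀ (s : String), Dom_secondsToRemoveOccurrences2 s → Spec_secondsToRemoveOccurrences2 s (secondsToRemoveOccurrences2 s)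
def Claim_changed_secondsToRemoveOccurrences2 : Prop := Dom_secondsToRemoveOccurrences2 (pvDiffWitness_secondsToRemoveOccurrences2) ∧ D_secondsToRemoveOccurrences2 (pvDiffWitness_secondsToRemoveOccurrences2) ∧ secondsToRemoveOccurrences2 (pvDiffWitness_secondsToRemoveOccurrences2) = pvDiffWitnessOut_secondsToRemoveOccurrences2.1 ∧ secondsToRemoveOccurrences2_alt (pvDiffWitness_secondsToRemoveOccurrences2) = pvDiffWitnessOut_secondsToRemoveOccurrences2.2 ∧ pvDiffWitnessOut_secondsToRemoveOccurrences2.1 ≠ pvDiffWitnessOut_secondsToRemoveOccurrences2.2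
def Claim_exact_secondsToRemoveOccurrences2 : Prop := ∀ (s : String), Dom_secondsToRemoveOccurrences2 s → D_secondsToRemoveOccurrences2 s → secondsToRemoveOccurrences2 s ≠ secondsToRemoveOccurrences2_alt s

-- ===== LEMMAS AND PROOFS =====

-- step equations for B's scan
theorem altGo_nil (z t a : Int) : altGo [] z t a = a := rfl
theorem altGo_zero (l : List Char) (z t a : Int) :
    altGo ('0' :: l) z t a = altGo l (z + 1) t a := rfl
theorem altGo_one (l : List Char) (z t a : Int) :
    altGo ('1' :: l) z t a =
      if z > 0 then altGo l z (max (t + 1) z) (max a (max (t + 1) z)) else altGo l z t a := rfl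
theorem altGo_other (c : Char) (l : List Char) (z t a : Int) (hc0 : ¬ c = '0')
    (hc1 : ¬ c = '1') : altGo (c :: l) z t a = altGo l 0 0 a := by
  simp only [altGo, if_neg hc0, if_neg hc1]

-- the running maximum only grows
theorem altGo_ge (l : List Char) : ∀ z t a : Int, a ≤ altGo l z t a := by
  induction l with
  | nil => intro z t a; simp [altGo_nil]
  | cons c r ih =>
    intro z t a
    by_cases hc0 : c = '0'
    · subst hc0; rw [altGo_zero]; exact ih _ _ _
    · by_cases hc1 : c = '1'
      · subst hc1
        rw [altGo_one]
        by_cases hzpos : z > 0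
        · rw [if_pos hzpos]
          exact le_trans (le_max_left a _) (ih _ _ _)
        · rw [if_neg hzpos]; exact ih _ _ _
      · rw [altGo_other c r z t a hc0 hc1]; exact ih _ _ _

-- key lemma: one pass of A decreases B's scan value by one (clamped at zero),
-- uniformly in the scan state (zeros z, time t, answer a)
theorem altGo_pass (l : List Char) : ∀ z t a : Int, 0 ≤ z → 0 ≤ t → 0 ≤ a →
    (z = 0 → t = 0) → (l.head? = some '1' → z ≤ t) →
    altGo (passA l) z (max (t - 1) 0) (max (a - 1) 0) = max (altGo l z t a - 1) 0 := by
  induction l using passA.induct with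
  | case1 =>
    intro z t a hz ht ha hzt h1
    rfl
  | case2 c =>
    intro z t a hz ht ha hzt h1
    have hp : passA [c] = [c] := rfl
    rw [hp]
    by_cases hc0 : c = '0'
    · subst hc0
      rw [altGo_zero, altGo_zero, altGo_nil, altGo_nil]
    · by_cases hc1 : c = '1'
      · subst hc1
        rw [altGo_one, altGo_one]
        by_cases hzpos : z > 0
        · have hzt' : z ≤ t := h1 rfl
          rw [if_pos hzpos, if_pos hzpos, altGo_nil, altGo_nil]
          omega
        · have ht0 : t = 0 := hzt (by omega)
          rw [if_neg hzpos, if_neg hzpos, altGo_nil, altGo_nil]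
      · rw [altGo_other c [] _ _ _ hc0 hc1, altGo_other c [] _ _ _ hc0 hc1, altGo_nil,
          altGo_nil]
  | case3 c c2 r hpat ih =>
    intro z t a hz ht ha hzt h1
    obtain ⟨hc0, hc1⟩ := hpat
    subst hc0; subst hc1
    have hp : passA ('0' :: '1' :: r) = '1' :: '0' :: passA r := rfl
    have hR : altGo ('0' :: '1' :: r) z t a
        = altGo r (z + 1) (max (t + 1) (z + 1)) (max a (max (t + 1) (z + 1))) := by
      rw [altGo_zero, altGo_one, if_pos (show z + 1 > 0 by omega)]
    by_cases hzpos : z > 0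
    · have hL : altGo (passA ('0' :: '1' :: r)) z (max (t - 1) 0) (max (a - 1) 0)
          = altGo (passA r) (z + 1) (max (max (t - 1) 0 + 1) z)
              (max (max (a - 1) 0) (max (max (t - 1) 0 + 1) z)) := by
        rw [hp, altGo_one, if_pos hzpos, altGo_zero]
      rw [hL, hR]
      have e1 : max (max (t - 1) 0 + 1) z = max (max (t + 1) (z + 1) - 1) 0 := by omega
      have e2 : max (max (a - 1) 0) (max (max (t + 1) (z + 1) - 1) 0)
          = max (max a (max (t + 1) (z + 1)) - 1) 0 := by omega
      rw [e1, e2]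
      exact ih (z + 1) (max (t + 1) (z + 1)) (max a (max (t + 1) (z + 1)))
        (by omega) (by omega) (by omega) (by omega) (fun _ => by omega)
    · have ht0 : t = 0 := hzt (by omega)
      subst ht0
      have hL : altGo (passA ('0' :: '1' :: r)) z (max ((0:Int) - 1) 0) (max (a - 1) 0)
          = altGo (passA r) (z + 1) (max ((0:Int) - 1) 0) (max (a - 1) 0) := by
        rw [hp, altGo_one, if_neg hzpos, altGo_zero]
      rw [hL, hR]
      have e1 : max ((0 : Int) - 1) 0 = max (max ((0:Int) + 1) (z + 1) - 1) 0 := by omega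
      have e2 : max (a - 1) 0 = max (max a (max ((0:Int) + 1) (z + 1)) - 1) 0 := by omega
      rw [e1, e2]
      exact ih (z + 1) (max (0 + 1) (z + 1)) (max a (max (0 + 1) (z + 1)))
        (by omega) (by omega) (by omega) (by omega) (fun _ => by omega)
  | case4 c c2 r hpat ih =>
    intro z t a hz ht ha hzt h1
    have hp : passA (c :: c2 :: r) = c :: passA (c2 :: r) := by
      simp only [passA, if_neg hpat]
    rw [hp]
    by_cases hc0 : c = '0'
    · have hc2 : ¬ c2 = '1' := fun h => hpat ⟨hc0, h⟩
      subst hc0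
      rw [altGo_zero, altGo_zero]
      exact ih (z + 1) t a (by omega) ht ha (by omega)
        (fun hh => absurd (Option.some.inj hh) hc2)
    · by_cases hc1 : c = '1'
      · subst hc1
        rw [altGo_one, altGo_one]
        by_cases hzpos : z > 0
        · have hzt' : z ≤ t := h1 rfl
          rw [if_pos hzpos, if_pos hzpos]
          have e1 : max (max (t - 1) 0 + 1) z = max (max (t + 1) z - 1) 0 := by omega
          have e2 : max (max (a - 1) 0) (max (max (t + 1) z - 1) 0)
              = max (max a (max (t + 1) z) - 1) 0 := by omega
          rw [e1, e2]
          exact ih z (max (t + 1) z) (max a (max (t + 1) z))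
            hz (by omega) (by omega) (by omega) (fun _ => by omega)
        · have ht0 : t = 0 := hzt (by omega)
          subst ht0
          rw [if_neg hzpos, if_neg hzpos]
          exact ih z 0 a hz le_rfl ha (fun _ => rfl) (fun _ => by omega)
      · rw [altGo_other c _ _ _ _ hc0 hc1, altGo_other c _ _ _ _ hc0 hc1]
        exact ih 0 0 a le_rfl le_rfl ha (fun _ => rfl) (fun _ => le_rfl)

-- if the pass changes nothing, B's scan returns its accumulator unchanged
theorem altGo_nochange (l : List Char) : ∀ z a : Int, passA l = l →
    (l.head? = some '1' → z = 0) → altGo l z 0 a = a := by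
  induction l using passA.induct with
  | case1 => intro z a _ _; rfl
  | case2 c =>
    intro z a _ h1
    by_cases hc0 : c = '0'
    · subst hc0; rw [altGo_zero, altGo_nil]
    · by_cases hc1 : c = '1'
      · subst hc1
        have hz : z = 0 := h1 rfl
        subst hz
        rw [altGo_one, if_neg (by omega : ¬ (0:Int) > 0), altGo_nil]
      · rw [altGo_other c [] _ _ _ hc0 hc1, altGo_nil]
  | case3 c c2 r hpat ih =>
    intro z a hfix h1
    obtain ⟨hc0, hc1⟩ := hpat
    subst hc0; subst hc1
    have hp : passA ('0' :: '1' :: r) = '1' :: '0' :: passA r := rfl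
    rw [hp] at hfix
    exact absurd (List.head_eq_of_cons_eq hfix) (by decide)
  | case4 c c2 r hpat ih =>
    intro z a hfix h1
    have hp : passA (c :: c2 :: r) = c :: passA (c2 :: r) := by
      simp only [passA, if_neg hpat]
    rw [hp] at hfix
    have hfix' : passA (c2 :: r) = c2 :: r := List.tail_eq_of_cons_eq hfix
    by_cases hc0 : c = '0'
    · have hc2 : ¬ c2 = '1' := fun h => hpat ⟨hc0, h⟩
      subst hc0
      rw [altGo_zero]
      exact ih (z + 1) a hfix' (fun hh => absurd (Option.some.inj hh) hc2)
    · by_cases hc1 : c = '1'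
      · subst hc1
        have hz : z = 0 := h1 rfl
        subst hz
        rw [altGo_one, if_neg (by omega : ¬ (0:Int) > 0)]
        exact ih 0 a hfix' (fun _ => rfl)
      · rw [altGo_other c _ _ _ _ hc0 hc1]
        exact ih 0 a hfix' (fun _ => rfl)

-- if the pass does change the string, B's scan value is at least 1
theorem altGo_pos (l : List Char) : ∀ z t a : Int, 0 ≤ z → 0 ≤ t →
    passA l ≠ l → 1 ≤ altGo l z t a := by
  induction l using passA.induct with
  | case1 => intro z t a _ _ hne; exact absurd rfl hne
  | case2 c => intro z t a _ _ hne; exact absurd rfl hne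
  | case3 c c2 r hpat ih =>
    intro z t a hz ht _
    obtain ⟨hc0, hc1⟩ := hpat
    subst hc0; subst hc1
    rw [altGo_zero, altGo_one, if_pos (show z + 1 > 0 by omega)]
    have h1 : (1 : Int) ≤ max a (max (t + 1) (z + 1)) := by omega
    exact le_trans h1 (altGo_ge r _ _ _)
  | case4 c c2 r hpat ih =>
    intro z t a hz ht hne
    have hp : passA (c :: c2 :: r) = c :: passA (c2 :: r) := by
      simp only [passA, if_neg hpat]
    have hne' : passA (c2 :: r) ≠ c2 :: r := by
      intro he; apply hne; rw [hp, he]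
    by_cases hc0 : c = '0'
    · subst hc0
      rw [altGo_zero]
      exact ih (z + 1) t a (by omega) ht hne'
    · by_cases hc1 : c = '1'
      · subst hc1
        rw [altGo_one]
        by_cases hzpos : z > 0
        · rw [if_pos hzpos]
          exact ih z _ _ hz (by omega) hne'
        · rw [if_neg hzpos]
          exact ih z t a hz ht hne'
      · rw [altGo_other c _ _ _ _ hc0 hc1]
        exact ih 0 0 a le_rfl le_rfl hne'

-- B's scan value is bounded by the state plus the remaining length
theorem altGo_bound (l : List Char) : ∀ z t a : Int, 0 ≤ z → 0 ≤ t → 0 ≤ a →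
    altGo l z t a ≤ max a (max t z) + l.length := by
  induction l with
  | nil => intro z t a _ _ _; rw [altGo_nil]; simp
  | cons c r ih =>
    intro z t a hz ht ha
    simp only [List.length_cons]
    push_cast
    by_cases hc0 : c = '0'
    · subst hc0; rw [altGo_zero]
      have := ih (z + 1) t a (by omega) ht ha; omega
    · by_cases hc1 : c = '1'
      · subst hc1
        rw [altGo_one]
        by_cases hzpos : z > 0
        · rw [if_pos hzpos]
          have := ih z (max (t + 1) z) (max a (max (t + 1) z)) hz (by omega) (by omega)
          omega
        · rw [if_neg hzpos]
          have := ih z t a hz ht ha; omega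
      · rw [altGo_other c _ _ _ _ hc0 hc1]
        have := ih 0 0 a le_rfl le_rfl ha; omega

-- the outer loop of A, given enough fuel, adds exactly B's scan value to the counter
theorem loopA_eq : ∀ (f : Nat) (cnt : Int) (l : List Char),
    (altGo l 0 0 0).toNat < f → loopA f cnt l (passA l) = cnt + altGo l 0 0 0 := by
  intro f
  induction f with
  | zero => intro cnt l h; omega
  | succ f ih =>
    intro cnt l h
    by_cases he : l = passA l
    · have h0 : altGo l 0 0 0 = 0 := altGo_nochange l 0 0 he.symm (fun _ => rfl)
      simp [loopA, if_pos he, h0]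
    · have hne : passA l ≠ l := fun hh => he hh.symm
      have hstep : altGo (passA l) 0 0 0 = max (altGo l 0 0 0 - 1) 0 :=
        altGo_pass l 0 0 0 le_rfl le_rfl le_rfl (fun _ => rfl) (fun _ => le_rfl)
      have hpos : 1 ≤ altGo l 0 0 0 := altGo_pos l 0 0 0 le_rfl le_rfl hne
      have hlt : (altGo (passA l) 0 0 0).toNat < f := by rw [hstep]; omega
      have hrec := ih (cnt + 1) (passA l) hlt
      simp only [loopA, if_neg he, hrec, hstep]
      omega

-- ===== VERDICT (by name: the statements are the Claim_ definitions above) =====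
theorem secondsToRemoveOccurrences2_spec : Claim_unchanged_secondsToRemoveOccurrences2 := by
  unfold Claim_unchanged_secondsToRemoveOccurrences2
  intro s _ hD
  unfold D_secondsToRemoveOccurrences2 at hD
  have hl : s.toList ≠ [] := by
    intro he; exact hD (String.toList_eq_nil_iff.mp he)
  unfold secondsToRemoveOccurrences2 secondsToRemoveOccurrences2_alt
  have hstep : loopA ((s.toList.length + 1) + 1) (-1) [] s.toList
      = if ([] : List Char) = s.toList then (-1 : Int)
        else loopA (s.toList.length + 1) ((-1) + 1) s.toList (passA s.toList) := rfl
  have hcnt : ((-1 : Int) + 1) = 0 := rfl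
  rw [show s.toList.length + 2 = (s.toList.length + 1) + 1 from rfl, hstep,
    if_neg (fun hh : ([] : List Char) = s.toList => hl hh.symm), hcnt]
  have hb : altGo s.toList 0 0 0 ≤ (s.toList.length : Int) := by
    have := altGo_bound s.toList 0 0 0 le_rfl le_rfl le_rfl
    omega
  have hge : (0 : Int) ≤ altGo s.toList 0 0 0 := altGo_ge s.toList 0 0 0
  have hmain := loopA_eq (s.toList.length + 1) 0 s.toList (by omega)
  rw [hmain]
  omega

theorem secondsToRemoveOccurrences2_changed : Claim_changed_secondsToRemoveOccurrences2 := by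
  unfold Claim_changed_secondsToRemoveOccurrences2; decide

theorem secondsToRemoveOccurrences2_tight : Claim_exact_secondsToRemoveOccurrences2 := by
  unfold Claim_exact_secondsToRemoveOccurrences2
  intro s _ hD
  unfold D_secondsToRemoveOccurrences2 at hD
  subst hD
  decide
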